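-- pv_equiv track=rewrite | github.com/zbhayat0/CourtReserve | test.py | count_plates
-- ===== SOURCE A (Python) =====
-- def count_plates(N, NUM_CHARACTERS=5):
--     # Constants for ASCII values of uppercase letters
--     ASCII_START = 65
--     ASCII_END = 90
--
--     # Initialize DP table
--     dp = [[0 for _ in range(N+1)] for _ in range(NUM_CHARACTERS+1)]
--
--     # Base case: 1 way to make sum 0 with 0 characters
--     dp[0][0] = 1
--
--     # Fill the DP table
--     for i in range(1, NUM_CHARACTERS + 1):
--         for j in range(N + 1):
--             for c in range(ASCII_START, ASCII_END + 1):
--                 if j >= c: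
--                     dp[i][j] += dp[i-1][j-c]
--
--     # The answer is the number of ways to form sum N with exactly 10 characters
--     return dp[NUM_CHARACTERS][N]
-- ===== SOURCE B (Python) =====
-- def count_plates(N, NUM_CHARACTERS=5):
--     # prefix-sum sliding window: new[j] = sum(old[j-90..j-65]) in O(1) per cell
--     dp = [0] * (N + 1)
--     dp[0] = 1
--     for _ in range(NUM_CHARACTERS):
--         pref = [0]
--         s = 0
--         for x in dp:
--             s += x
--             pref.append(s)
--         dp = [pref[max(j - 64, 0)] - pref[max(j - 90, 0)] for j in range(N + 1)]
--     return dp[N]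
-- ===== Notes on version B (the rewrite author's own statement) =====
-- stated objective: faster
-- what changed: replaced A's innermost 26-way scan over the character range by a prefix-sum array so each DP cell is a sliding-window difference of two prefix sums, and kept only one DP row instead of the full table
import Mathlib
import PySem

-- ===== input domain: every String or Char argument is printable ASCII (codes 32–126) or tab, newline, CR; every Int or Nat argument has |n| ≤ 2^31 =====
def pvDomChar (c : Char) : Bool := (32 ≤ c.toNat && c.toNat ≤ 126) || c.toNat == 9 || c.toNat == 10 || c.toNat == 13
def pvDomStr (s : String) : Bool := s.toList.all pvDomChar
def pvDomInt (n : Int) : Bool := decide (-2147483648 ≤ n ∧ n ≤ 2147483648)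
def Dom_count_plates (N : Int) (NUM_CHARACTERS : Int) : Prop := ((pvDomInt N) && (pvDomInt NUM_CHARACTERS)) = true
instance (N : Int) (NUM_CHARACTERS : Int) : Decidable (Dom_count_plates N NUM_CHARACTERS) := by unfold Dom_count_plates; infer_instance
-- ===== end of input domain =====

-- B replaces A's innermost 26-way scan by prefix sums (each DP cell becomes a window
-- difference of two prefix sums) and keeps one DP row instead of the whole table; faster.

-- ===== PORT A =====
-- row 0 of A's table: dp[0][j] = 1 iff j = 0 (only dp[0][0] is set to 1)
def aBase (N : Int) : List Int :=
  (PySem.List.pyRange 0 (N + 1) 1).map (fun j => if j = 0 then (1 : Int) else 0)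

-- one iteration of A's `for i` loop: dp[i][j] = sum over c in 65..90 with j >= c of dp[i-1][j-c]
def aRow (prev : List Int) (N : Int) : List Int :=
  (PySem.List.pyRange 0 (N + 1) 1).map (fun j =>
    (PySem.List.pyRange 65 91 1).foldl
      (fun acc c => if c ≤ j then acc + PySem.List.pyGetD prev (j - c) 0 else acc) 0)

-- A's table, row by row (each row only depends on the previous one)
def aRows (N : Int) : Nat → List Int
  | 0 => aBase N
  | i + 1 => aRow (aRows N i) N

def count_plates (N : Int) (NUM_CHARACTERS : Int) : Int :=
  PySem.List.pyGetD (aRows N NUM_CHARACTERS.toNat) N 0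

-- ===== PORT B =====
-- dp = [0]*(N+1); dp[0] = 1
def bInit (N : Int) : List Int :=
  PySem.List.pySetD (List.replicate (N + 1).toNat (0 : Int)) 0 1

-- pref = [0]; s = 0; for x in dp: s += x; pref.append(s)
def bPref (dp : List Int) : List Int :=
  (dp.foldl (fun ps x => (ps.1 ++ [ps.2 + x], ps.2 + x)) (([0] : List Int), (0 : Int))).1

-- dp = [pref[max(j-64,0)] - pref[max(j-90,0)] for j in range(N+1)]
def bStep (N : Int) (dp : List Int) : List Int :=
  let pref := bPref dp
  (PySem.List.pyRange 0 (N + 1) 1).map (fun j =>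
    PySem.List.pyGetD pref (max (j - 64) 0) 0 - PySem.List.pyGetD pref (max (j - 90) 0) 0)

-- the `for _ in range(NUM_CHARACTERS)` loop
def bIter (N : Int) : Nat → List Int
  | 0 => bInit N
  | i + 1 => bStep N (bIter N i)

def count_plates_alt (N : Int) (NUM_CHARACTERS : Int) : Int :=
  PySem.List.pyGetD (bIter N NUM_CHARACTERS.toNat) N 0

-- ===== PRECONDITION & SPEC =====
-- Python A raises IndexError (dp[0][0] on an empty/short table) exactly when N < 0 or
-- NUM_CHARACTERS < 0; those inputs are excluded.
def Pre_count_plates (N : Int) (NUM_CHARACTERS : Int) : Prop := 0 ≤ N ∧ 0 ≤ NUM_CHARACTERS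
instance (N : Int) (NUM_CHARACTERS : Int) : Decidable (Pre_count_plates N NUM_CHARACTERS) := by
  unfold Pre_count_plates; infer_instance

def pvWitness_count_plates : Int × Int := (330, 5)

def Spec_count_plates (N : Int) (NUM_CHARACTERS : Int) (out : Int) : Prop := out = count_plates_alt N NUM_CHARACTERS
instance (N : Int) (NUM_CHARACTERS : Int) (out : Int) : Decidable (Spec_count_plates N NUM_CHARACTERS out) := by unfold Spec_count_plates; infer_instance

-- ===== CLAIM (what is proved, stated in full; the proofs are below) =====
def Claim_equal_count_plates : Prop := ∀ (N : Int) (NUM_CHARACTERS : Int), Dom_count_plates N NUM_CHARACTERS → Pre_count_plates N NUM_CHARACTERS → Spec_count_plates N NUM_CHARACTERS (count_plates N NUM_CHARACTERS)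

-- ===== LEMMAS AND PROOFS =====

-- the common mathematical recurrence: W i j = number of length-i strings of chars 65..90 summing to j
def Wfun : Nat → Int → Int
  | 0, j => if j = 0 then 1 else 0
  | i + 1, j => ((List.range 26).map (fun (t : Nat) => Wfun i (j - 65 - (t : Int)))).sum

theorem Wfun_neg (i : Nat) (j : Int) (h : j < 0) : Wfun i j = 0 := by
  induction i generalizing j with
  | zero => simp [Wfun]; omega
  | succ i ih =>
    simp only [Wfun]
    have : ∀ x ∈ (List.range 26).map (fun (t : Nat) => Wfun i (j - 65 - (t : Int))), x = 0 := by
      intro x hx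
      simp only [List.mem_map] at hx
      obtain ⟨t, _, rfl⟩ := hx
      have ht : (0 : Int) ≤ (t : Int) := Int.natCast_nonneg t
      exact ih _ (by omega)
    rw [List.sum_eq_zero this]

-- prefix sums of W i over 0,1,2,…
def Sfun (i : Nat) (t : Nat) : Int := ((List.range t).map (fun (u : Nat) => Wfun i (u : Int))).sum

theorem Sfun_window (i : Nat) (k : Int) (m : Nat) :
    ((List.range m).map (fun (t : Nat) => Wfun i (k - (t : Int)))).sum
      = Sfun i (k + 1).toNat - Sfun i (k + 1 - m).toNat := by
  induction m with
  | zero => simp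
  | succ m ih =>
    rw [List.range_succ, List.map_append, List.sum_append, ih]
    simp only [List.map_cons, List.map_nil, List.sum_cons, List.sum_nil, add_zero]
    have hstep : Sfun i (k + 1 - m).toNat - Sfun i (k + 1 - (m + 1 : Nat)).toNat
        = Wfun i (k - m) := by
      by_cases hk : 0 ≤ k - m
      · have h1 : (k + 1 - m).toNat = (k - m).toNat + 1 := by omega
        have h2 : (k + 1 - (m + 1 : Nat)).toNat = (k - m).toNat := by push_cast; omega
        rw [h1, h2, Sfun, Sfun, List.range_succ, List.map_append, List.sum_append]
        simp only [List.map_cons, List.map_nil, List.sum_cons, List.sum_nil, add_zero,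
          add_sub_cancel_left]
        congr 1
        omega
      · have h1 : (k + 1 - m).toNat = 0 := by omega
        have h2 : (k + 1 - (m + 1 : Nat)).toNat = 0 := by push_cast; omega
        rw [h1, h2, Wfun_neg i _ (by omega)]
        ring
    omega

-- base rows agree with W 0
theorem aBase_eq (N : Int) : aBase N = (PySem.List.pyRange 0 (N + 1) 1).map (Wfun 0) := rfl

theorem bInit_eq (N : Int) : bInit N = (PySem.List.pyRange 0 (N + 1) 1).map (Wfun 0) := by
  unfold bInit
  rw [PySem.List.pySetD_of_nonneg _ _ (by norm_num), PySem.List.pyRange_zero,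
      show ((0 : Int)).toNat = 0 from rfl]
  apply List.ext_getElem
  · simp
  · intro k h1 h2
    simp only [List.getElem_set, List.getElem_replicate, List.getElem_map,
      List.getElem_range]
    simp only [List.length_set, List.length_replicate] at h1
    rcases Nat.eq_zero_or_pos k with hk | hk
    · simp [hk, Wfun]
    · have hkn : k ≠ 0 := by omega
      simp [Wfun, hkn, eq_comm]

-- A's row transformer realises the recurrence
theorem aRow_eq (N : Int) (i : Nat) :
    aRow ((PySem.List.pyRange 0 (N + 1) 1).map (Wfun i)) N
      = (PySem.List.pyRange 0 (N + 1) 1).map (Wfun (i + 1)) := by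
  unfold aRow
  apply List.map_congr_left
  intro j hj
  obtain ⟨hj0, hjN⟩ := PySem.List.mem_pyRange_one.mp hj
  have hfun : (fun (acc : Int) (c : Int) =>
      if c ≤ j then acc + PySem.List.pyGetD ((PySem.List.pyRange 0 (N + 1) 1).map (Wfun i)) (j - c) 0 else acc)
      = fun acc c => acc +
        (if c ≤ j then PySem.List.pyGetD ((PySem.List.pyRange 0 (N + 1) 1).map (Wfun i)) (j - c) 0 else 0) := by
    funext acc c; split <;> simp
  rw [hfun, PySem.List.foldl_add, zero_add, PySem.List.pyRange_one 65 91,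
      show ((91 : Int) - 65).toNat = 26 from rfl]
  simp only [List.map_map]
  rw [show Wfun (i + 1) j = ((List.range 26).map (fun (t : Nat) => Wfun i (j - 65 - (t : Int)))).sum from rfl]
  apply congrArg
  apply List.map_congr_left
  intro t ht
  simp only [List.mem_range] at ht
  simp only [Function.comp_apply]
  by_cases hc : (65 : Int) + t ≤ j
  · rw [if_pos hc, PySem.List.pyGetD_map_pyRange_of_nonneg _ _ _ _ (by omega) (by omega)]
    congr 1; ring
  · rw [if_neg hc, Wfun_neg i _ (by omega)]

-- bPref computes the running partial sums
theorem bPref_foldl (xs : List Int) : ∀ (p : List Int) (s : Int),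
    (xs.foldl (fun ps x => (ps.1 ++ [ps.2 + x], ps.2 + x)) (p, s)).1
      = p ++ (List.range xs.length).map (fun t => s + (xs.take (t + 1)).sum) := by
  induction xs with
  | nil => intro p s; simp
  | cons x xs ih =>
    intro p s
    simp only [List.foldl_cons, ih, List.length_cons, List.range_succ_eq_map,
      List.map_cons, List.map_map, List.take_succ_cons, List.sum_cons, List.take_zero,
      List.sum_nil, add_zero, List.append_assoc, List.singleton_append]
    apply congrArg
    apply congrArg
    apply List.map_congr_left
    intro t _
    simp only [Function.comp_apply]
    ring

theorem bPref_eq (xs : List Int) :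
    bPref xs = (List.range (xs.length + 1)).map (fun t => (xs.take t).sum) := by
  unfold bPref
  rw [bPref_foldl, List.range_succ_eq_map, List.map_cons, List.map_map]
  simp [Function.comp]

-- reading the prefix list of row i at a clamped window bound gives Sfun
theorem bPref_get (N : Int) (i : Nat) (m : Int) (hm : m ≤ N + 1) (hN : 0 ≤ N) :
    PySem.List.pyGetD (bPref ((PySem.List.pyRange 0 (N + 1) 1).map (Wfun i))) (max m 0) 0
      = Sfun i m.toNat := by
  set xs := (PySem.List.pyRange 0 (N + 1) 1).map (Wfun i) with hxs
  have hlen : xs.length = (N + 1).toNat := by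
    simp [hxs, PySem.List.pyRange_zero]
  rw [bPref_eq]
  have h0 : (0 : Int) ≤ max m 0 := le_max_right m 0
  have h1 : max m 0 < ((List.range (xs.length + 1)).map (fun t => (xs.take t).sum)).length := by
    simp [hlen]; omega
  rw [PySem.List.pyGetD_eq_getElem _ _ h0 h1]
  simp only [List.getElem_map, List.getElem_range]
  have htn : (max m 0).toNat = m.toNat := by omega
  rw [htn]
  -- (xs.take m.toNat).sum = Sfun i m.toNat
  rw [hxs, PySem.List.pyRange_zero, List.map_map, ← List.map_take, List.take_range]
  have hmin : min m.toNat (N + 1).toNat = m.toNat := by omega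
  rw [hmin]
  simp [Sfun, Function.comp_def]

-- B's row transformer realises the same recurrence
theorem bStep_eq (N : Int) (i : Nat) (hN : 0 ≤ N) :
    bStep N ((PySem.List.pyRange 0 (N + 1) 1).map (Wfun i))
      = (PySem.List.pyRange 0 (N + 1) 1).map (Wfun (i + 1)) := by
  unfold bStep
  apply List.map_congr_left
  intro j hj
  obtain ⟨hj0, hjN⟩ := PySem.List.mem_pyRange_one.mp hj
  rw [bPref_get N i (j - 64) (by omega) hN, bPref_get N i (j - 90) (by omega) hN]
  have := Sfun_window i (j - 65) 26
  rw [show Wfun (i + 1) j = ((List.range 26).map (fun (t : Nat) => Wfun i (j - 65 - (t : Int)))).sum from rfl]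
  rw [this]
  congr 2 <;> omega

-- the two tables coincide row by row
theorem rows_eq (N : Int) (hN : 0 ≤ N) (i : Nat) :
    aRows N i = bIter N i ∧ aRows N i = (PySem.List.pyRange 0 (N + 1) 1).map (Wfun i) := by
  induction i with
  | zero => exact ⟨(aBase_eq N).trans (bInit_eq N).symm, aBase_eq N⟩
  | succ i ih =>
    obtain ⟨hab, hw⟩ := ih
    have ha : aRows N (i + 1) = (PySem.List.pyRange 0 (N + 1) 1).map (Wfun (i + 1)) := by
      show aRow (aRows N i) N = _
      rw [hw, aRow_eq]
    refine ⟨?_, ha⟩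
    show aRow (aRows N i) N = bStep N (bIter N i)
    rw [← hab, hw, aRow_eq, bStep_eq N i hN]

-- ===== VERDICT (by name: the statement is the Claim_ definition above) =====
theorem count_plates_spec : Claim_equal_count_plates := by
  intro N K _ hpre
  unfold Spec_count_plates count_plates count_plates_alt
  rw [(rows_eq N hpre.1 K.toNat).1]
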